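-- pv_equiv track=rewrite | github.com/sujayadkesar/eventhawk | sentinel/report/ted_forensic.py | _keyroots
-- ===== SOURCE A (Python) =====
-- from dataclasses import dataclass, field
--
-- @dataclass
-- class ProcessTree:
--     """A rooted ordered process tree node."""
--     name: str
--     pid: int = 0
--     children: list["ProcessTree"] = field(default_factory=list)
--
-- def _keyroots(nodes: list[ProcessTree], lld: list[int]) -> list[int]:
--     """Keyroots: nodes that have a unique leftmost leaf descendant."""
--     seen: set[int] = set()
--     kr: list[int] = []
--     for i in reversed(range(len(nodes))):
--         if lld[i] not in seen:
--             seen.add(lld[i])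
--             kr.append(i)
--     return sorted(kr)
-- ===== SOURCE B (Python) =====
-- def _keyroots(nodes, lld):
--     """Keyroots: nodes that have a unique leftmost leaf descendant."""
--     n = len(nodes)
--     return [i for i in range(n) if lld[i] not in lld[i + 1 : n]]
-- ===== Notes on version B (the rewrite author's own statement) =====
-- stated objective: simpler
-- what changed: Replaced the reverse scan with a mutable seen-set, conditional append and final sort by a single forward comprehension that keeps index i exactly when lld[i] does not recur at a later index (lld[i] not in lld[i+1:n]); the result is produced already in ascending order, so no set and no sort are needed.
import Mathlib
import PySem

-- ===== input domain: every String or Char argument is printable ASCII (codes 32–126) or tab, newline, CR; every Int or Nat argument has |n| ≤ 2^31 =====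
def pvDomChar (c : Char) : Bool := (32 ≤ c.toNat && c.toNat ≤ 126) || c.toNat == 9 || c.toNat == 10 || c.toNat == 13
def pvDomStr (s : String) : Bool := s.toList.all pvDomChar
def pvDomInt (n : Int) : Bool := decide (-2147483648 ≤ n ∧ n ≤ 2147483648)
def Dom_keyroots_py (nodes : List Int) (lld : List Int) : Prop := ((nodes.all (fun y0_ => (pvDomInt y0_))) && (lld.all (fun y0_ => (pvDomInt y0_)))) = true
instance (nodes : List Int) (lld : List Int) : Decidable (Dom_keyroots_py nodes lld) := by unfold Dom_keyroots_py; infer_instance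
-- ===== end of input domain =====

-- B replaces A's reverse scan with a seen-set, conditional append and final sort by one
-- forward comprehension (keep i iff lld[i] does not recur later), already ascending; objective: simpler.

-- ===== PORT A =====
def keyroots_py (nodes : List Int) (lld : List Int) : List Int :=
  let res := (PySem.List.pyRange ((nodes.length : Int) - 1) (-1) (-1)).foldl
    (fun (st : PySem.Set Int × List Int) i =>
      if st.1.contains (PySem.List.pyGetD lld i 0) then st
      else (st.1.add (PySem.List.pyGetD lld i 0), st.2 ++ [i]))
    (PySem.Set.empty, [])
  PySem.List.sorted res.2 (fun x => x) false

-- ===== PORT B =====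
def keyroots_py_alt (nodes : List Int) (lld : List Int) : List Int :=
  let n : Int := (nodes.length : Int)
  (PySem.List.pyRange 0 n 1).filter
    (fun i => !((PySem.List.slice lld (some (i + 1)) (some n)).contains (PySem.List.pyGetD lld i 0)))

-- ===== PRECONDITION & SPEC =====
-- Pre_ excludes exactly the inputs where A raises IndexError: lld shorter than nodes (B raises there too).
def Pre_keyroots_py (nodes : List Int) (lld : List Int) : Prop := nodes.length ≤ lld.length
instance (nodes : List Int) (lld : List Int) : Decidable (Pre_keyroots_py nodes lld) := by unfold Pre_keyroots_py; infer_instance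
def pvWitness_keyroots_py : List Int × List Int := ([7, 8, 9], [5, 5, 6])

def Spec_keyroots_py (nodes : List Int) (lld : List Int) (out : List Int) : Prop := out = keyroots_py_alt nodes lld
instance (nodes : List Int) (lld : List Int) (out : List Int) : Decidable (Spec_keyroots_py nodes lld out) := by unfold Spec_keyroots_py; infer_instance

-- ===== CLAIM (what is proved, stated in full; the proofs are below) =====
def Claim_equal_keyroots_py : Prop := ∀ (nodes : List Int) (lld : List Int), Dom_keyroots_py nodes lld → Pre_keyroots_py nodes lld → Spec_keyroots_py nodes lld (keyroots_py nodes lld)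

-- ===== LEMMAS AND PROOFS =====

-- index j < n is a keyroot iff its lld value does not recur at a later index < n
def keepIdx (lld : List Int) (n j : Nat) : Bool :=
  decide (∀ k : Nat, k < n → j < k → lld.getD k 0 ≠ lld.getD j 0)

theorem mem_drop_take {l : List Int} {a b : Nat} {x : Int} :
    x ∈ (l.drop a).take b ↔ ∃ k : Nat, a ≤ k ∧ k < a + b ∧ k < l.length ∧ l.getD k 0 = x := by
  rw [List.mem_iff_getElem]
  constructor
  · rintro ⟨i, hi, he⟩
    have h2 : i < (l.drop a).length := lt_of_lt_of_le hi (by simp [List.length_take])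
    have h1 : i < b := lt_of_lt_of_le hi (by simp [List.length_take])
    refine ⟨a + i, by omega, by omega, by simp at h2; omega, ?_⟩
    rw [List.getElem_take, List.getElem_drop] at he
    rw [List.getD_eq_getElem _ _ (by simp at h2; omega)]
    exact he
  · rintro ⟨k, h1, h2, h3, h4⟩
    refine ⟨k - a, ?_, ?_⟩
    · simp [List.length_take, List.length_drop]; omega
    · rw [List.getElem_take, List.getElem_drop]
      rw [List.getD_eq_getElem _ _ (by omega)] at h4
      convert h4 using 2; omega

-- A's reverse loop, characterised: processing indices m-1 .. 0 with a seen-set that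
-- already holds the lld values of indices [m, n), it appends exactly the keyroots of
-- [0, m) in descending order.
theorem loopA (lld : List Int) (n : Nat) :
    ∀ (m : Nat), m ≤ n → ∀ (S : PySem.Set Int) (K : List Int),
    (∀ x : Int, S.contains x = true ↔ ∃ j : Nat, m ≤ j ∧ j < n ∧ lld.getD j 0 = x) →
    ((PySem.List.pyRange ((m : Int) - 1) (-1) (-1)).foldl
      (fun (st : PySem.Set Int × List Int) i =>
        if st.1.contains (PySem.List.pyGetD lld i 0) then st
        else (st.1.add (PySem.List.pyGetD lld i 0), st.2 ++ [i]))
      (S, K)).2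
      = K ++ (((List.range m).filter (keepIdx lld n)).map (fun j : Nat => (j : Int))).reverse := by
  intro m
  induction m with
  | zero =>
    intro _ S K _
    rw [PySem.List.pyRange_neg_one_eq_nil (by norm_num)]
    simp
  | succ m ih =>
    intro hm S K hS
    rw [show (((m + 1 : Nat) : Int) - 1) = (m : Int) by push_cast; ring]
    rw [PySem.List.pyRange_neg_one_cons (by omega)]
    rw [List.foldl_cons]
    have hv : PySem.List.pyGetD lld (m : Int) 0 = lld.getD m 0 := by
      simp [PySem.List.pyGetD_natCast]
    by_cases hc : S.contains (PySem.List.pyGetD lld (m : Int) 0) = true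
    · -- lld[m] already seen later: index m is skipped
      rw [if_pos hc]
      have hkeep : keepIdx lld n m = false := by
        rw [hv] at hc
        obtain ⟨j, hj1, hj2, hj3⟩ := (hS _).mp hc
        simp only [keepIdx, decide_eq_false_iff_not]
        push Not
        exact ⟨j, hj2, by omega, hj3⟩
      have hS' : ∀ x : Int, S.contains x = true ↔ ∃ j : Nat, m ≤ j ∧ j < n ∧ lld.getD j 0 = x := by
        intro x
        constructor
        · intro h
          obtain ⟨j, h1, h2, h3⟩ := (hS x).mp h
          exact ⟨j, by omega, h2, h3⟩
        · rintro ⟨j, h1, h2, h3⟩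
          by_cases hj : m + 1 ≤ j
          · exact (hS x).mpr ⟨j, hj, h2, h3⟩
          · have hje : j = m := by omega
            subst hje
            rw [hv] at hc
            rw [← h3]
            exact hc
      rw [ih (by omega) S K hS']
      rw [List.range_succ, List.filter_append]
      simp [hkeep]
    · -- lld[m] not seen later: index m is a keyroot
      rw [if_neg hc]
      have hkeep : keepIdx lld n m = true := by
        simp only [keepIdx, decide_eq_true_eq]
        intro k hk hmk he
        exact hc (by rw [hv]; exact (hS _).mpr ⟨k, by omega, hk, he⟩)
      have hS' : ∀ x : Int, (S.add (PySem.List.pyGetD lld (m : Int) 0)).contains x = true ↔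
          ∃ j : Nat, m ≤ j ∧ j < n ∧ lld.getD j 0 = x := by
        intro x
        rw [PySem.Set.contains_iff, PySem.Set.mem_add]
        constructor
        · rintro (h | h)
          · obtain ⟨j, h1, h2, h3⟩ := (hS x).mp ((PySem.Set.contains_iff S x).mpr h)
            exact ⟨j, by omega, h2, h3⟩
          · exact ⟨m, le_refl _, by omega, by rw [← hv, h]⟩
        · rintro ⟨j, h1, h2, h3⟩
          by_cases hj : m + 1 ≤ j
          · exact Or.inl ((PySem.Set.contains_iff S x).mp ((hS x).mpr ⟨j, hj, h2, h3⟩))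
          · have hje : j = m := by omega
            subst hje
            exact Or.inr (by rw [← h3, hv])
      rw [ih (by omega) _ _ hS']
      rw [List.range_succ, List.filter_append]
      simp [hkeep]

-- B's comprehension, characterised: it is the ascending list of keyroots of [0, n).
theorem altB (nodes lld : List Int) (h : nodes.length ≤ lld.length) :
    keyroots_py_alt nodes lld
      = ((List.range nodes.length).filter (keepIdx lld nodes.length)).map (fun j : Nat => (j : Int)) := by
  show (PySem.List.pyRange 0 ((nodes.length : Nat) : Int) 1).filter
      (fun i => !((PySem.List.slice lld (some (i + 1)) (some ((nodes.length : Nat) : Int))).contains (PySem.List.pyGetD lld i 0))) = _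
  rw [PySem.List.pyRange_zero_nat]
  rw [List.filter_map]
  apply congrArg (List.map (fun j : Nat => (j : Int)))
  apply List.filter_congr
  intro j hj
  rw [List.mem_range] at hj
  simp only [Function.comp]
  have hv : PySem.List.pyGetD lld ((j : Nat) : Int) 0 = lld.getD j 0 := by
    simp [PySem.List.pyGetD_natCast]
  rw [hv]
  rw [show ((j : Nat) : Int) + 1 = ((j + 1 : Nat) : Int) by push_cast; ring]
  rw [PySem.List.slice_natCast]
  simp only [keepIdx]
  have hmem : (((lld.drop (j+1)).take (nodes.length - (j+1))).contains (lld.getD j 0)) = true ↔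
      ∃ k : Nat, j + 1 ≤ k ∧ k < nodes.length ∧ lld.getD k 0 = lld.getD j 0 := by
    rw [List.contains_iff_mem, mem_drop_take]
    constructor
    · rintro ⟨k, h1, h2, h3, h4⟩
      exact ⟨k, h1, by omega, h4⟩
    · rintro ⟨k, h1, h2, h4⟩
      exact ⟨k, h1, by omega, by omega, h4⟩
  rcases Bool.eq_false_or_eq_true (((lld.drop (j+1)).take (nodes.length - (j+1))).contains (lld.getD j 0)) with hb | hb
  · rw [hb]
    simp only [Bool.not_true]
    symm
    rw [decide_eq_false_iff_not]
    intro hall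
    obtain ⟨k, h1, h2, h3⟩ := hmem.mp hb
    exact hall k h2 (by omega) h3
  · rw [hb]
    simp only [Bool.not_false]
    symm
    rw [decide_eq_true_eq]
    intro k hk hjk he
    exact absurd (hmem.mpr ⟨k, by omega, hk, he⟩) (by rw [hb]; simp)

-- ===== VERDICT (by name: the statement is the Claim_ definition above) =====
theorem keyroots_py_spec : Claim_equal_keyroots_py := by
  intro nodes lld _ hpre
  unfold Spec_keyroots_py
  have h0 : ∀ x : Int, (PySem.Set.empty : PySem.Set Int).contains x = true ↔
      ∃ j : Nat, nodes.length ≤ j ∧ j < nodes.length ∧ lld.getD j 0 = x := by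
    intro x
    constructor
    · intro hx
      simp [PySem.Set.contains, PySem.Set.empty] at hx
    · rintro ⟨j, h1, h2, _⟩
      omega
  have hA := loopA lld nodes.length nodes.length (le_refl _) PySem.Set.empty [] h0
  show PySem.List.sorted
      ((PySem.List.pyRange ((nodes.length : Int) - 1) (-1) (-1)).foldl
        (fun (st : PySem.Set Int × List Int) i =>
          if st.1.contains (PySem.List.pyGetD lld i 0) then st
          else (st.1.add (PySem.List.pyGetD lld i 0), st.2 ++ [i]))
        (PySem.Set.empty, [])).2 (fun x => x) false = keyroots_py_alt nodes lld
  rw [hA, altB nodes lld hpre, List.nil_append]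
  apply PySem.List.sorted_eq_of_perm_of_pairwise_lt
  · exact (List.reverse_perm _).symm
  · rw [List.pairwise_map]
    refine List.Pairwise.imp ?_ (List.Pairwise.filter _ (List.pairwise_lt_range))
    intro a b hab
    exact_mod_cast hab
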